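-- pv_equiv track=rewrite | github.com/ningshuang-yao/Asgan | asgan/output_generator.py | pretty_number
-- ===== SOURCE A (Python) =====
-- def pretty_number(number, min_width=12, fill=" "):
--     digits = []
--     number = str(number)
--     is_neg = False
--
--     if number.startswith("-"):
--         is_neg = True
--         number = number[1:]
--
--     start = int(round(len(number) % 3, 0))
--
--     if start != 0:
--         digits.append(number[:start])
--     digits.extend([number[i:i+3] for i in range(start, len(number), 3)])
--
--     number = "\'".join(digits)
--     if is_neg:
--         number = "-" + number
--
--     if min_width is not None and len(number) < min_width:
--         number += " " * (min_width - len(number))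
--
--     return number
-- ===== SOURCE B (Python) =====
-- def pretty_number(number, min_width=12, fill=" "):
--     s = str(number)
--     neg = s.startswith("-")
--     if neg:
--         s = s[1:]
--     out_chars = []
--     cnt = 0
--     for ch in reversed(s):
--         if cnt == 3:
--             out_chars.append("'")
--             cnt = 0
--         out_chars.append(ch)
--         cnt += 1
--     out = "".join(reversed(out_chars))
--     if neg:
--         out = "-" + out
--     if min_width is not None:
--         pad = min_width - len(out)
--         if pad > 0:
--             out = out + " " * pad
--     return out
-- ===== Notes on version B (the rewrite author's own statement) =====
-- stated objective: alternative
-- what changed: B makes a single right-to-left pass over the digit string with a counter, emitting an apostrophe after every third character and reversing the accumulated output once, instead of A's computing len%3, slicing a head group and forward 3-slices and joining the chunk list.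
import Mathlib
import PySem

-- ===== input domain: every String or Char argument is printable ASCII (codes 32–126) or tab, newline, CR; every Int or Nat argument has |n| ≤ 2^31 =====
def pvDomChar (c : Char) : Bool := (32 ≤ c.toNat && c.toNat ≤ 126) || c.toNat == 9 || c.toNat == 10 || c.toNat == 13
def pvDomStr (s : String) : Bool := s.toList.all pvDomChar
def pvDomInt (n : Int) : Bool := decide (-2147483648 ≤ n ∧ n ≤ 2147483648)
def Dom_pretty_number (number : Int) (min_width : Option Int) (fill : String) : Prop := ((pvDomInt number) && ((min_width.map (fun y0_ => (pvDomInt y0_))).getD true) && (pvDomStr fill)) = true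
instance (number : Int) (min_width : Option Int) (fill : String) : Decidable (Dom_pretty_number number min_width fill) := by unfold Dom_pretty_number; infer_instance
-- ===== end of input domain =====

-- B replaces A's chunk-list construction (len%3 head group, forward 3-slices, join) by a single
-- right-to-left character pass with a counter that inserts the apostrophes as it goes;
-- objective: alternative decomposition, same cost.  Both Pythons ignore `fill` and pad with spaces.

-- ===== PORT A =====
-- literal port of A: start = int(round(len%3, 0)) = len % 3 (round of an int is the int);
-- digits = optional short head group ++ forward 3-slices from `start`; join; sign; pad.
def pretty_number (number : Int) (min_width : Option Int) (fill : String) : String :=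
  let number := PySem.Int.toChars number
  let is_neg := PySem.Chars.startswith number ['-']
  let number := if is_neg then PySem.List.slice number (some 1) none else number
  let start : Int := PySem.Int.mod ((number.length : Int)) 3
  let digits : List (List Char) :=
    (if start ≠ 0 then [PySem.List.slice number none (some start)] else []) ++
      (PySem.List.pyRange start ((number.length : Int)) 3).map
        (fun i => PySem.List.slice number (some i) (some (i + 3)))
  let number := PySem.Chars.join ['\''] digits
  let number := if is_neg then '-' :: number else number
  match min_width with
  | some w =>
      if ((number.length : Int)) < w then
        String.ofList (number ++ PySem.List.pyRepeat [' '] (w - (number.length : Int)))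
      else String.ofList number
  | none => String.ofList number

-- ===== PORT B =====
-- one iteration of Source B's loop body: maybe emit the separator and reset the counter,
-- then append the character and bump the counter
def pvStep (st : List Char × Int) (ch : Char) : List Char × Int :=
  let st := if st.2 == 3 then (st.1 ++ ['\''], 0) else st
  (st.1 ++ [ch], st.2 + 1)

-- literal port of Source B: fold pvStep over reversed(s), reverse the accumulated output,
-- re-attach the sign, pad when the deficit is positive.
def pretty_number_alt (number : Int) (min_width : Option Int) (fill : String) : String :=
  let s := PySem.Int.toChars number
  let neg := PySem.Chars.startswith s ['-']
  let s := if neg then PySem.List.slice s (some 1) none else s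
  let body := (s.reverse.foldl pvStep ([], 0)).1.reverse
  let out := if neg then '-' :: body else body
  match min_width with
  | some w =>
      let pad := w - (out.length : Int)
      if 0 < pad then String.ofList (out ++ PySem.List.pyRepeat [' '] pad)
      else String.ofList out
  | none => String.ofList out

-- ===== PRECONDITION & SPEC =====
def Spec_pretty_number (number : Int) (min_width : Option Int) (fill : String) (out : String) : Prop := out = pretty_number_alt number min_width fill
instance (number : Int) (min_width : Option Int) (fill : String) (out : String) : Decidable (Spec_pretty_number number min_width fill out) := by unfold Spec_pretty_number; infer_instance

-- ===== CLAIM (what is proved, stated in full; the proofs are below) =====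
def Claim_equal_pretty_number : Prop := ∀ (number : Int) (min_width : Option Int) (fill : String), Dom_pretty_number number min_width fill → Spec_pretty_number number min_width fill (pretty_number number min_width fill)

-- ===== LEMMAS AND PROOFS =====

-- chunks of three from the FRONT: the canonical form both pipelines are reduced to
def pvChunk3 {α : Type} (l : List α) : List (List α) :=
  if h : l = [] then [] else l.take 3 :: pvChunk3 (l.drop 3)
termination_by l.length
decreasing_by
  simp only [List.length_drop]
  have := List.length_pos_iff.mpr h
  omega

theorem pvChunk3_nil {α : Type} : pvChunk3 ([] : List α) = [] := by
  rw [pvChunk3]; simp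

theorem pvChunk3_cons {α : Type} {l : List α} (h : l ≠ []) :
    pvChunk3 l = l.take 3 :: pvChunk3 (l.drop 3) := by
  rw [pvChunk3]; simp [h]

theorem pvChunk3_short {α : Type} {l : List α} (h0 : l ≠ []) (h3 : l.length ≤ 3) :
    pvChunk3 l = [l] := by
  rw [pvChunk3_cons h0, List.take_of_length_le h3, List.drop_eq_nil_of_le h3, pvChunk3_nil]

theorem pvChunk3_append {α : Type} :
    ∀ (n : Nat) (m t : List α), m.length ≤ n → 3 ∣ m.length →
      pvChunk3 (m ++ t) = pvChunk3 m ++ pvChunk3 t := by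
  intro n
  induction n with
  | zero =>
      intro m t hm _
      have : m = [] := List.eq_nil_of_length_eq_zero (by omega)
      simp [this, pvChunk3_nil]
  | succ n ih =>
      intro m t hm hd
      by_cases h0 : m = []
      · simp [h0, pvChunk3_nil]
      · have hlen : 0 < m.length := List.length_pos_iff.mpr h0
        have h3 : 3 ≤ m.length := by omega
        have hmt : m ++ t ≠ [] := by simp [h0]
        rw [pvChunk3_cons hmt, pvChunk3_cons h0,
          List.take_append_of_le_length h3, List.drop_append_of_le_length h3,
          ih (m.drop 3) t (by simp; omega) (by simp; omega)]
        simp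

theorem pvRange3_nil (a b : Int) (h : b ≤ a) : PySem.List.pyRange a b 3 = [] := by
  rw [PySem.List.pyRange_of_pos a b (by norm_num), if_neg (not_lt.mpr h)]
  simp

theorem pvRange3_cons (a b : Int) (h : a < b) :
    PySem.List.pyRange a b 3 = a :: PySem.List.pyRange (a + 3) b 3 := by
  rw [PySem.List.pyRange_of_pos a b (by norm_num),
    PySem.List.pyRange_of_pos (a + 3) b (by norm_num), if_pos h]
  have hc : ((b - a + 3 - 1) / 3).toNat
      = (if a + 3 < b then ((b - (a + 3) + 3 - 1) / 3).toNat else 0) + 1 := by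
    split_ifs <;> omega
  rw [hc, List.range_succ_eq_map, List.map_cons, List.map_map]
  congr 1
  · simp
  · refine List.map_congr_left fun k _ => ?_
    simp only [Function.comp, Nat.succ_eq_add_one]
    push_cast
    ring

-- A's forward 3-slice comprehension over range(i, len, 3) is pvChunk3 of the drop
theorem pvMapSlice_eq_chunk3 {α : Type} :
    ∀ (n : Nat) (l : List α) (i : Nat), l.length - i ≤ n →
      (PySem.List.pyRange (i : Int) ((l.length : Int)) 3).map
          (fun j => PySem.List.slice l (some j) (some (j + 3)))
        = pvChunk3 (l.drop i) := by
  intro n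
  induction n with
  | zero =>
      intro l i h
      have hle : l.length ≤ i := by omega
      rw [pvRange3_nil _ _ (by exact_mod_cast hle), List.drop_eq_nil_of_le hle, pvChunk3_nil]
      simp
  | succ n ih =>
      intro l i h
      by_cases hle : l.length ≤ i
      · rw [pvRange3_nil _ _ (by exact_mod_cast hle), List.drop_eq_nil_of_le hle, pvChunk3_nil]
        simp
      · have hlt : i < l.length := by omega
        rw [pvRange3_cons _ _ (by exact_mod_cast hlt), List.map_cons,
          show ((i : Int) + 3) = (((i + 3 : Nat)) : Int) by push_cast; ring,
          PySem.List.slice_natCast, ih l (i + 3) (by omega),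
          pvChunk3_cons (l := l.drop i) (by simp only [ne_eq, List.drop_eq_nil_iff]; omega)]
        congr 2
        · omega
        · rw [List.drop_drop]

-- reverse-chunk-reverse equals A's head-group-then-forward-chunks layout
theorem pvRevChunks_eq {α : Type} :
    ∀ (n : Nat) (l : List α), l.length ≤ n →
      ((pvChunk3 l.reverse).map List.reverse).reverse
        = (if l.length % 3 ≠ 0 then [l.take (l.length % 3)] else [])
            ++ pvChunk3 (l.drop (l.length % 3)) := by
  intro n
  induction n with
  | zero =>
      intro l h
      have : l = [] := List.eq_nil_of_length_eq_zero (by omega)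
      simp [this, pvChunk3_nil]
  | succ n ih =>
      intro l h
      by_cases h0 : l = []
      · simp [h0, pvChunk3_nil]
      by_cases h3 : l.length ≤ 3
      · have hr : l.reverse ≠ [] := by simp [h0]
        rw [pvChunk3_short hr (by simpa using h3)]
        simp only [List.map_cons, List.map_nil, List.reverse_cons, List.reverse_nil,
          List.nil_append, List.reverse_reverse]
        by_cases hl3 : l.length = 3
        · rw [if_neg (by omega), List.nil_append, hl3]
          simp only [Nat.mod_self, List.drop_zero]
          rw [pvChunk3_short h0 h3]
        · have hlt : l.length < 3 := by omega
          have hpos : 0 < l.length := List.length_pos_iff.mpr h0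
          have hm : l.length % 3 = l.length := Nat.mod_eq_of_lt hlt
          rw [if_pos (by omega), hm, List.take_of_length_le (le_refl _),
            List.drop_eq_nil_of_le (le_refl _), pvChunk3_nil, List.append_nil]
      · -- l.length > 3 : peel the last three elements
        have hlen : 3 < l.length := by omega
        obtain ⟨k, hk⟩ : ∃ k, k = l.length - 3 := ⟨_, rfl⟩
        have hsplit : l.take k ++ l.drop k = l := List.take_append_drop k l
        have htklen : (l.take k).length = k := by simp; omega
        have hdlen : (l.drop k).length = 3 := by simp; omega
        have hdne : l.drop k ≠ [] := by simp only [ne_eq, List.drop_eq_nil_iff]; omega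
        have hrne : l.reverse ≠ [] := by simp [h0]
        have hrev : l.reverse = (l.drop k).reverse ++ (l.take k).reverse := by
          conv_lhs => rw [← hsplit]
          rw [List.reverse_append]
        rw [pvChunk3_cons hrne, hrev,
          List.take_append_of_le_length (l₁ := (l.drop k).reverse)
            (l₂ := (l.take k).reverse) (i := 3) (by simp [hdlen]),
          List.take_of_length_le (i := 3) (l := (l.drop k).reverse) (by simp [hdlen]),
          List.drop_append_of_le_length (l₁ := (l.drop k).reverse)
            (l₂ := (l.take k).reverse) (i := 3) (by simp [hdlen]),
          List.drop_eq_nil_of_le (as := (l.drop k).reverse) (i := 3) (by simp [hdlen]),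
          List.nil_append]
        simp only [List.map_cons, List.reverse_cons, List.reverse_reverse]
        rw [ih (l.take k) (by simp; omega)]
        have hmod : l.length % 3 = k % 3 := by omega
        have hrk : l.length % 3 ≤ k := by omega
        have htake' : ∀ r, r ≤ k → l.take r = (l.take k).take r := fun r hr => by
          rw [List.take_take, min_eq_left hr]
        have hdrop' : ∀ r, r ≤ k → l.drop r = (l.take k).drop r ++ l.drop k := by
          intro r hr
          conv_lhs => rw [← hsplit]
          rw [List.drop_append_of_le_length (by simp; omega)]
        rw [htake' _ hrk, hdrop' _ hrk,
          pvChunk3_append (n := ((l.take k).drop (l.length % 3)).length) _ _ (le_refl _)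
            (by simp [htklen]; omega),
          htklen, ← hmod, List.append_assoc, pvChunk3_short hdne (le_of_eq hdlen)]

-- join over a cons of two or more chunks
theorem pvJoin_cons {c : Char} {x : List Char} {t : List (List Char)} (h : t ≠ []) :
    PySem.Chars.join [c] (x :: t) = x ++ [c] ++ PySem.Chars.join [c] t := by
  obtain ⟨y, t', rfl⟩ := List.exists_cons_of_ne_nil h
  rw [PySem.Chars.join_cons_cons]

-- join over a snoc
theorem pvJoin_snoc (c : Char) (x : List Char) :
    ∀ t : List (List Char), t ≠ [] →
      PySem.Chars.join [c] (t ++ [x]) = PySem.Chars.join [c] t ++ [c] ++ x := by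
  intro t
  induction t with
  | nil => intro h; exact absurd rfl h
  | cons y t ih =>
      intro _
      by_cases h0 : t = []
      · subst h0
        rw [List.cons_append, List.nil_append, PySem.Chars.join_cons_cons,
          PySem.Chars.join_singleton, PySem.Chars.join_singleton]
      · rw [List.cons_append, pvJoin_cons (by simp), pvJoin_cons h0, ih h0]
        simp

-- joining the reversed list of reversed chunks is the reverse of the join
theorem pvJoin_rev (c : Char) :
    ∀ t : List (List Char),
      PySem.Chars.join [c] ((t.map List.reverse).reverse)
        = (PySem.Chars.join [c] t).reverse := by
  intro t
  induction t with
  | nil => simp [PySem.Chars.join_nil]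
  | cons x t ih =>
      by_cases h0 : t = []
      · subst h0
        simp [PySem.Chars.join_singleton]
      · have hne : (t.map List.reverse).reverse ≠ [] := by simp [h0]
        rw [List.map_cons, List.reverse_cons, pvJoin_snoc _ _ _ hne, ih,
          pvJoin_cons h0]
        simp

-- after hitting cnt = 3, stepping is the same as stepping from (out ++ ['\''], 0)
theorem pvStep_reset (o : List Char) (d : Char) (t : List Char) :
    (d :: t).foldl pvStep (o, 3) = (d :: t).foldl pvStep (o ++ ['\''], 0) := by
  simp [List.foldl_cons, pvStep]

-- the fold from (o, 0) appends exactly the apostrophe-joined 3-chunks of its input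
theorem pvFold_join :
    ∀ (n : Nat) (l o : List Char), l.length ≤ n →
      (l.foldl pvStep (o, 0)).1 = o ++ PySem.Chars.join ['\''] (pvChunk3 l) := by
  intro n
  induction n with
  | zero =>
      intro l o h
      have : l = [] := List.eq_nil_of_length_eq_zero (by omega)
      simp [this, pvChunk3_nil, PySem.Chars.join_nil]
  | succ n ih =>
      intro l o h
      match l, h with
      | [], _ => simp [pvChunk3_nil, PySem.Chars.join_nil]
      | [a], _ =>
          simp [pvStep, pvChunk3_short (l := [a]) (by simp) (by simp),
            PySem.Chars.join_singleton]
      | [a, b], _ =>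
          simp [pvStep, pvChunk3_short (l := [a, b]) (by simp) (by simp),
            PySem.Chars.join_singleton]
      | [a, b, c], _ =>
          simp [pvStep, pvChunk3_short (l := [a, b, c]) (by simp) (by simp),
            PySem.Chars.join_singleton]
      | a :: b :: c :: d :: t, h =>
          have h1 : (a :: b :: c :: d :: t).foldl pvStep (o, 0)
              = (d :: t).foldl pvStep (o ++ [a, b, c], 3) := by
            simp [List.foldl_cons, pvStep]
          rw [h1, pvStep_reset, ih (d :: t) (o ++ [a, b, c] ++ ['\'']) (by simp at h ⊢; omega)]
          have hchunk : pvChunk3 (a :: b :: c :: d :: t) = [a, b, c] :: pvChunk3 (d :: t) := by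
            rw [pvChunk3_cons (by simp)]
            simp
          have hne : pvChunk3 (d :: t) ≠ [] := by
            rw [pvChunk3_cons (by simp)]
            simp
          rw [hchunk, pvJoin_cons hne]
          simp

-- A's joined digit-group body equals B's reversed fold output, for any character list
theorem pvBody_eq (l : List Char) :
    PySem.Chars.join ['\'']
      ((if PySem.Int.mod ((l.length : Int)) 3 ≠ 0 then
          [PySem.List.slice l none (some (PySem.Int.mod ((l.length : Int)) 3))] else [])
        ++ (PySem.List.pyRange (PySem.Int.mod ((l.length : Int)) 3) ((l.length : Int)) 3).map
            (fun i => PySem.List.slice l (some i) (some (i + 3))))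
    = ((l.reverse.foldl pvStep ([], 0)).1).reverse := by
  rw [pvFold_join l.reverse.length l.reverse [] (le_refl _), List.nil_append,
    ← pvJoin_rev '\'' (pvChunk3 l.reverse)]
  have hm : PySem.Int.mod ((l.length : Int)) 3 = ((l.length % 3 : Nat) : Int) := by
    exact_mod_cast PySem.Int.mod_natCast l.length 3
  rw [hm, PySem.List.slice_to_natCast,
    pvMapSlice_eq_chunk3 l.length l (l.length % 3) (by omega),
    if_congr (P := ((l.length % 3 : Nat) : Int) ≠ 0) (Q := (l.length % 3 : Nat) ≠ 0)
      (by omega) rfl rfl,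
    ← pvRevChunks_eq l.length l (le_refl _)]

theorem pv_core (number : Int) (min_width : Option Int) (fill : String) :
    pretty_number number min_width fill = pretty_number_alt number min_width fill := by
  simp only [pretty_number, pretty_number_alt]
  rw [pvBody_eq]
  cases min_width with
  | none => rfl
  | some w =>
      simp only []
      split_ifs with h1 h2 h2 <;> first | rfl | omega

-- ===== VERDICT (by name: the statement is the Claim_ definition above) =====
theorem pretty_number_spec : Claim_equal_pretty_number := by
  intro number min_width fill _
  unfold Spec_pretty_number
  exact pv_core number min_width fill
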